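-- pv_equiv track=rewrite | github.com/itachi1010/hackerrank-competition-code- | main3.3.py | can_visit_all_indices
-- ===== SOURCE A (Python) =====
-- class DSU:
--     def __init__(self, n):
--         self.parent = list(range(n))
--         self.rank = [0] * n
--
--     def find(self, x):
--         if self.parent[x] != x:
--             self.parent[x] = self.find(self.parent[x])
--         return self.parent[x]
--
--     def union(self, x, y):
--         root_x = self.find(x)
--         root_y = self.find(y)
--
--         if root_x != root_y:
--             if self.rank[root_x] < self.rank[root_y]:
--                 root_x, root_y = root_y, root_x
--             self.parent[root_y] = root_x
--             if self.rank[root_x] == self.rank[root_y]: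
--                 self.rank[root_x] += 1
--
-- def hamming_distance(str1, str2):
--     return sum(c1 != c2 for c1, c2 in zip(str1, str2))
--
-- def can_visit_all_indices(strings):
--     n = len(strings)
--     dsu = DSU(n)
--
--     for i in range(n):
--         for j in range(i + 1, n):
--             if hamming_distance(strings[i], strings[j]) == 1:
--                 dsu.union(i, j)
--
--     root = dsu.find(0)
--     return "YES" if all(dsu.find(i) == root for i in range(1, n)) else "NO"
-- ===== SOURCE B (Python) =====
-- def hamming_one(s, t):
--     # True iff the zip-truncated Hamming distance is exactly 1 (early exit past 1)
--     d = 0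
--     for a, b in zip(s, t):
--         if a != b:
--             d += 1
--             if d > 1:
--                 return False
--     return d == 1
--
--
-- def can_visit_all_indices(strings):
--     n = len(strings)
--     labels = list(range(n))
--     for j in range(n):
--         for i in range(j):
--             if hamming_one(strings[i], strings[j]):
--                 li, lj = labels[i], labels[j]
--                 if li != lj:
--                     labels = [li if l == lj else l for l in labels]
--     return "YES" if all(l == labels[0] for l in labels) else "NO"
-- ===== Notes on version B (the rewrite author's own statement) =====
-- stated objective: simpler
-- what changed: Replaced the rank/path-compression union-find (DSU class) with a flat label array that is relabelled in full on each merge, and the zip-sum Hamming distance with an early-exit exactly-one-mismatch test.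
import Mathlib
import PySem

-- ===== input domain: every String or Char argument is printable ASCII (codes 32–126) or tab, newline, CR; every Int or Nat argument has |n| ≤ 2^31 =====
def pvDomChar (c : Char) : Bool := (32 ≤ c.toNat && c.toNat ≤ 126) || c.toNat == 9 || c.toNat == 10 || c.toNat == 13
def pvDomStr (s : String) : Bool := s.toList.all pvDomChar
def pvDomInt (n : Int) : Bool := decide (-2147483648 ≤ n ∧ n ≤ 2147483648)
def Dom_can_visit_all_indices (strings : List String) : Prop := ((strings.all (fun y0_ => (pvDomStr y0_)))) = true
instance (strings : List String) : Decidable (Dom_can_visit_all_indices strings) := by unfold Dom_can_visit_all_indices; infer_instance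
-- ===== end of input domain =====

-- B replaces A's rank/path-compression union-find with a flat label array relabelled on
-- each merge, and the zip-sum Hamming distance with an early-exit exactly-one test (simpler).

-- ===== PORT A =====
-- hamming_distance: sum(c1 != c2 for c1, c2 in zip(str1, str2)); exact (zip truncates)
def pvHamming (s t : String) : Nat :=
  (s.toList.zip t.toList).foldl (fun acc c => acc + (if c.1 ≠ c.2 then 1 else 0)) 0

-- DSU.find with path compression; fuel = len(parent) always suffices on the forests A
-- builds, and indices stay in range there, so the getD reads are exact
def pvFind : Nat → List Nat → Nat → List Nat × Nat
  | 0, p, x => (p, x)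
  | fuel+1, p, x =>
      let px := p.getD x x
      if px ≠ x then
        let r := pvFind fuel p px
        let p2 := r.1.set x r.2
        (p2, p2.getD x x)
      else (p, px)

def pvUnion (p rk : List Nat) (x y : Nat) : List Nat × List Nat :=
  let fx := pvFind p.length p x
  let fy := pvFind fx.1.length fx.1 y
  if fx.2 ≠ fy.2 then
    let rr := if rk.getD fx.2 0 < rk.getD fy.2 0 then (fy.2, fx.2) else (fx.2, fy.2)
    let p3 := fy.1.set rr.2 rr.1
    let rk2 := if rk.getD rr.1 0 = rk.getD rr.2 0 then rk.set rr.1 (rk.getD rr.1 0 + 1) else rk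
    (p3, rk2)
  else (fy.1, rk)

-- all(dsu.find(i) == root for i in range(1, n)): short-circuits, threading the parent
-- list mutated by each find
def pvCheck (root : Nat) : List Nat → List Nat → Bool
  | _, [] => true
  | p, i :: rest =>
      let f := pvFind p.length p i
      if f.2 = root then pvCheck root f.1 rest else false

def can_visit_all_indices (strings : List String) : String :=
  let n := strings.length
  let dsu := (List.range n).foldl (fun st i =>
      (List.range' (i+1) (n - (i+1))).foldl (fun st j =>
        if pvHamming (strings.getD i "") (strings.getD j "") = 1 then
          pvUnion st.1 st.2 i j
        else st) st)
    (List.range n, List.replicate n 0)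
  let f0 := pvFind dsu.1.length dsu.1 0
  if pvCheck f0.2 f0.1 (List.range' 1 (n - 1)) then "YES" else "NO"

-- ===== PORT B =====
-- Source B hamming_one: early-exit test "zip-Hamming distance is exactly 1"
def pvHam1Aux : List (Char × Char) → Nat → Bool
  | [], d => d = 1
  | c :: rest, d =>
      if c.1 ≠ c.2 then
        if d + 1 > 1 then false else pvHam1Aux rest (d + 1)
      else pvHam1Aux rest d

def pvHamming1 (s t : String) : Bool := pvHam1Aux (s.toList.zip t.toList) 0

def can_visit_all_indices_alt (strings : List String) : String :=
  let n := strings.length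
  let labels := (List.range n).foldl (fun labels j =>
      (List.range j).foldl (fun labels i =>
        if pvHamming1 (strings.getD i "") (strings.getD j "") then
          let li := labels.getD i 0
          let lj := labels.getD j 0
          if li ≠ lj then labels.map (fun l => if l = lj then li else l) else labels
        else labels) labels)
    (List.range n)
  if labels.all (fun l => l = labels.getD 0 0) then "YES" else "NO"

-- ===== PRECONDITION & SPEC =====
-- Pre_ excludes only the empty list, on which A raises IndexError (dsu.find(0) on an
-- empty parent array).
def Pre_can_visit_all_indices (strings : List String) : Prop := strings ≠ []
instance (strings : List String) : Decidable (Pre_can_visit_all_indices strings) := by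
  unfold Pre_can_visit_all_indices; infer_instance

def pvWitness_can_visit_all_indices : List String := ["ab", "bb"]

def Spec_can_visit_all_indices (strings : List String) (out : String) : Prop :=
  out = can_visit_all_indices_alt strings
instance (strings : List String) (out : String) : Decidable (Spec_can_visit_all_indices strings out) := by
  unfold Spec_can_visit_all_indices; infer_instance

-- ===== CLAIM (what is proved, stated in full; the proofs are below) =====
def Claim_equal_can_visit_all_indices : Prop := ∀ (strings : List String),
  Dom_can_visit_all_indices strings → Pre_can_visit_all_indices strings →
    Spec_can_visit_all_indices strings (can_visit_all_indices strings)

-- ===== LEMMAS AND PROOFS =====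

-- ---- parent forests ----
def pget (p : List Nat) (x : Nat) : Nat := p.getD x x

def chase : Nat → List Nat → Nat → Nat
  | 0, _, x => x
  | k+1, p, x => if pget p x = x then x else chase k p (pget p x)

def rootp (p : List Nat) (x : Nat) : Nat := chase p.length p x

def Meas (p : List Nat) (d : Nat → Nat) : Prop :=
  ∀ x, x < p.length → pget p x < p.length ∧ (pget p x ≠ x → d (pget p x) < d x)

def Forest (p : List Nat) : Prop := ∃ d, Meas p d

def Dc (p : List Nat) (d : Nat → Nat) (x : Nat) : Nat :=
  ((Finset.range p.length).filter (fun y => d y < d x)).card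

lemma pget_of_ge {p : List Nat} {x : Nat} (h : p.length ≤ x) : pget p x = x := by
  simp [pget, List.getD_eq_getElem?_getD, List.getElem?_eq_none (by omega : p.length ≤ x)]

lemma pget_set {p : List Nat} {x v z : Nat} :
    pget (p.set x v) z = if z = x ∧ x < p.length then v else pget p z := by
  unfold pget
  by_cases hz : z = x
  · subst hz
    by_cases hx : z < p.length
    · simp [List.getD_eq_getElem?_getD, hx]
    · simp [hx, List.getD_eq_getElem?_getD]
  · simp [hz, List.getD_eq_getElem?_getD, List.getElem?_set_ne (fun h => hz h.symm)]

lemma Dc_lt {p : List Nat} {d : Nat → Nat} (hM : Meas p d) {x : Nat}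
    (hx : x < p.length) (hnr : pget p x ≠ x) : Dc p d (pget p x) < Dc p d x := by
  obtain ⟨hlt, hdesc⟩ := hM x hx
  apply Finset.card_lt_card
  constructor
  · intro y hy
    simp only [Finset.mem_filter, Finset.mem_range] at hy ⊢
    exact ⟨hy.1, hy.2.trans (hdesc hnr)⟩
  · intro hsub
    have := hsub (by simp only [Finset.mem_filter, Finset.mem_range]; exact ⟨hlt, hdesc hnr⟩)
    simp only [Finset.mem_filter] at this
    omega

lemma Dc_bound {p : List Nat} (d : Nat → Nat) {x : Nat} (hx : x < p.length) :
    Dc p d x < p.length := by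
  have hsub : (Finset.range p.length).filter (fun y => d y < d x) ⊆
      (Finset.range p.length).erase x := by
    intro y hy
    simp only [Finset.mem_filter, Finset.mem_range] at hy
    refine Finset.mem_erase.mpr ⟨fun h => ?_, by simp [hy.1]⟩
    subst h; omega
  have h1 := Finset.card_le_card hsub
  have h2 := Finset.card_erase_of_mem (Finset.mem_range.mpr hx)
  have h3 : 0 < (Finset.range p.length).card := Finset.card_pos.mpr ⟨x, Finset.mem_range.mpr hx⟩
  simp only [Finset.card_range] at h1 h2 h3
  unfold Dc
  omega

lemma chase_root {p : List Nat} {d : Nat → Nat} (hM : Meas p d) :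
    ∀ k x, Dc p d x < k → pget p (chase k p x) = chase k p x := by
  intro k
  induction k with
  | zero => intro x h; omega
  | succ k ih =>
    intro x h
    by_cases hr : pget p x = x
    · simpa [chase, hr] using hr
    · have hx : x < p.length := by
        by_contra hge
        exact hr (pget_of_ge (le_of_not_gt hge))
      have := Dc_lt hM hx hr
      simp only [chase, hr, if_neg hr]
      exact ih (pget p x) (by omega)

lemma chase_irrel {p : List Nat} {d : Nat → Nat} (hM : Meas p d) :
    ∀ k m x, Dc p d x < k → Dc p d x < m → chase k p x = chase m p x := by
  intro k
  induction k with
  | zero => intro m x h; omega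
  | succ k ih =>
    intro m x hk hm
    match m with
    | 0 => omega
    | m+1 =>
      by_cases hr : pget p x = x
      · simp [chase, hr]
      · have hx : x < p.length := by
          by_contra hge
          exact hr (pget_of_ge (le_of_not_gt hge))
        have := Dc_lt hM hx hr
        simp only [chase, if_neg hr]
        exact ih m (pget p x) (by omega) (by omega)

lemma rootp_of_root {p : List Nat} {x : Nat} (h : pget p x = x) : rootp p x = x := by
  unfold rootp; cases p.length <;> simp [chase, h]

lemma rootp_of_ge {p : List Nat} {x : Nat} (h : p.length ≤ x) : rootp p x = x :=
  rootp_of_root (pget_of_ge h)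

lemma rootp_root {p : List Nat} (hF : Forest p) (x : Nat) :
    pget p (rootp p x) = rootp p x := by
  by_cases hx : x < p.length
  · obtain ⟨d, hM⟩ := hF
    exact chase_root hM p.length x (Dc_bound d hx)
  · rw [rootp_of_ge (le_of_not_gt hx)]
    exact pget_of_ge (le_of_not_gt hx)

lemma rootp_step {p : List Nat} {d : Nat → Nat} (hM : Meas p d) {x : Nat}
    (hx : x < p.length) (hnr : pget p x ≠ x) : rootp p x = rootp p (pget p x) := by
  have hbx := Dc_bound d hx
  have hlt := Dc_lt hM hx hnr
  unfold rootp
  match hL : p.length with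
  | 0 => omega
  | L+1 =>
    have h1 : chase (L+1) p x = chase L p (pget p x) := by simp [chase, hnr]
    rw [h1]
    exact chase_irrel hM L (L+1) (pget p x) (by omega) (by omega)

lemma rootp_lt {p : List Nat} (hF : Forest p) {x : Nat} (hx : x < p.length) :
    rootp p x < p.length := by
  obtain ⟨d, hM⟩ := hF
  have aux : ∀ k z, z < p.length → Dc p d z < k → chase k p z < p.length := by
    intro k
    induction k with
    | zero => intro z hz h; omega
    | succ k ih =>
      intro z hz h
      by_cases hr : pget p z = z
      · simpa [chase, hr]
      · have := Dc_lt hM hz hr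
        simp only [chase, if_neg hr]
        exact ih (pget p z) (hM z hz).1 (by omega)
  exact aux p.length x hx (Dc_bound d hx)

lemma d_chase_le {p : List Nat} {d : Nat → Nat} (hM : Meas p d) :
    ∀ k x, Dc p d x < k → d (chase k p x) ≤ d x := by
  intro k
  induction k with
  | zero => intro x h; omega
  | succ k ih =>
    intro x h
    by_cases hr : pget p x = x
    · simp [chase, hr]
    · have hx : x < p.length := by
        by_contra hge
        exact hr (pget_of_ge (le_of_not_gt hge))
      have h1 := Dc_lt hM hx hr
      have h2 := (hM x hx).2 hr
      simp only [chase, if_neg hr]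
      exact le_trans (ih (pget p x) (by omega)) (by omega)

lemma d_rootp_lt {p : List Nat} {d : Nat → Nat} (hM : Meas p d) {x : Nat}
    (hx : x < p.length) (hnr : pget p x ≠ x) : d (rootp p x) < d x := by
  rw [rootp_step hM hx hnr]
  have h1 := Dc_lt hM hx hnr
  have h2 := Dc_bound d hx
  have h3 := d_chase_le hM p.length (pget p x) (by omega)
  have h4 := (hM x hx).2 hnr
  unfold rootp
  omega

lemma rootp_ne_self {p : List Nat} {d : Nat → Nat} (hM : Meas p d) {x : Nat}
    (hx : x < p.length) (hnr : pget p x ≠ x) : rootp p x ≠ x := by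
  intro h
  have hlt := d_rootp_lt hM hx hnr
  rw [h] at hlt
  omega

-- path compression: re-pointing a non-root x at its root keeps the forest and all roots
lemma forest_set_root {p : List Nat} (hF : Forest p) {x : Nat}
    (hx : x < p.length) (hnr : pget p x ≠ x) :
    Forest (p.set x (rootp p x)) ∧ ∀ z, rootp (p.set x (rootp p x)) z = rootp p z := by
  obtain ⟨d, hM⟩ := hF
  have hrroot : pget p (rootp p x) = rootp p x := rootp_root ⟨d, hM⟩ x
  have hrlt : rootp p x < p.length := rootp_lt ⟨d, hM⟩ hx
  have hrne : rootp p x ≠ x := rootp_ne_self hM hx hnr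
  have hlen : (p.set x (rootp p x)).length = p.length := by simp
  have hq : ∀ z, pget (p.set x (rootp p x)) z = if z = x then rootp p x else pget p z := by
    intro z
    rw [pget_set]
    by_cases hz : z = x <;> simp [hz, hx]
  have hMq : Meas (p.set x (rootp p x)) d := by
    intro z hz
    rw [hlen] at hz
    rw [hlen, hq]
    by_cases hzx : z = x
    · subst hzx
      simp only [if_pos rfl]
      exact ⟨hrlt, fun _ => d_rootp_lt hM hx hnr⟩
    · simp only [if_neg hzx]
      exact hM z hz
  refine ⟨⟨d, hMq⟩, ?_⟩
  have key : ∀ m z, d z < m → rootp (p.set x (rootp p x)) z = rootp p z := by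
    intro m
    induction m with
    | zero => intro z h; omega
    | succ m ih =>
      intro z hz
      by_cases hzlen : z < p.length
      · by_cases hzx : z = x
        · subst hzx
          have h1 : rootp (p.set z (rootp p z)) z = rootp (p.set z (rootp p z)) (rootp p z) := by
            rw [rootp_step hMq (by rw [hlen]; exact hzlen) (by rw [hq]; simp [hrne]), hq]
            simp
          rw [h1, rootp_of_root (by rw [hq]; simp [if_neg hrne, hrroot])]
        · by_cases hroot : pget p z = z
          · rw [rootp_of_root (by rw [hq, if_neg hzx]; exact hroot), rootp_of_root hroot]
          · have hdlt := (hM z hzlen).2 hroot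
            have h1 : rootp (p.set x (rootp p x)) z = rootp (p.set x (rootp p x)) (pget p z) := by
              rw [rootp_step hMq (by rw [hlen]; exact hzlen) (by rw [hq, if_neg hzx]; exact hroot),
                hq, if_neg hzx]
            rw [h1, ih (pget p z) (by omega), ← rootp_step hM hzlen hroot]
      · rw [rootp_of_ge (by rw [hlen]; exact le_of_not_gt hzlen),
          rootp_of_ge (le_of_not_gt hzlen)]
  intro z
  exact key (d z + 1) z (by omega)

-- union: linking root b beneath root a merges the two classes
lemma forest_set_link {p : List Nat} (hF : Forest p) {a b : Nat}
    (ha : pget p a = a) (hb : pget p b = b) (hab : a ≠ b)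
    (han : a < p.length) (hbn : b < p.length) :
    Forest (p.set b a) ∧
      ∀ z, rootp (p.set b a) z = if rootp p z = b then a else rootp p z := by
  obtain ⟨d, hM⟩ := hF
  have hlen : (p.set b a).length = p.length := by simp
  have hq : ∀ z, pget (p.set b a) z = if z = b then a else pget p z := by
    intro z
    rw [pget_set]
    by_cases hz : z = b <;> simp [hz, hbn]
  have hra : rootp p a = a := rootp_of_root ha
  have hrb : rootp p b = b := rootp_of_root hb
  have hMq : Meas (p.set b a) (fun z => if rootp p z = b then d z + d a + 1 else d z) := by
    intro z hz
    rw [hlen] at hz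
    rw [hlen, hq]
    by_cases hzb : z = b
    · subst hzb
      simp only [if_pos rfl]
      refine ⟨han, fun _ => ?_⟩
      simp [hra, hrb, hab]
    · simp only [if_neg hzb]
      refine ⟨(hM z hz).1, fun hnr => ?_⟩
      have hdlt := (hM z hz).2 hnr
      have hre : rootp p (pget p z) = rootp p z := (rootp_step hM hz hnr).symm
      rw [hre]
      split_ifs <;> omega
  refine ⟨⟨_, hMq⟩, ?_⟩
  have key : ∀ m z, d z < m →
      rootp (p.set b a) z = if rootp p z = b then a else rootp p z := by
    intro m
    induction m with
    | zero => intro z h; omega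
    | succ m ih =>
      intro z hz
      by_cases hzlen : z < p.length
      · by_cases hzb : z = b
        · subst hzb
          have h1 : rootp (p.set z a) z = rootp (p.set z a) a := by
            rw [rootp_step hMq (by rw [hlen]; exact hzlen)
              (by rw [hq]; simp [hab]), hq]
            simp
          rw [h1, rootp_of_root (by rw [hq, if_neg hab]; exact ha), hrb, if_pos rfl]
        · by_cases hroot : pget p z = z
          · rw [rootp_of_root (by rw [hq, if_neg hzb]; exact hroot), rootp_of_root hroot,
              if_neg hzb]
          · have hdlt := (hM z hzlen).2 hroot
            have h1 : rootp (p.set b a) z = rootp (p.set b a) (pget p z) := by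
              rw [rootp_step hMq (by rw [hlen]; exact hzlen)
                (by rw [hq, if_neg hzb]; exact hroot), hq, if_neg hzb]
            rw [h1, ih (pget p z) (by omega), ← rootp_step hM hzlen hroot]
      · have hzge := le_of_not_gt hzlen
        rw [rootp_of_ge (by rw [hlen]; exact hzge), rootp_of_ge hzge,
          if_neg (by omega : ¬ z = b)]
  intro z
  exact key (d z + 1) z (by omega)

lemma find_ok {p : List Nat} {d : Nat → Nat} (hM : Meas p d) :
    ∀ fuel x, x < p.length → Dc p d x < fuel →
      ∃ p', pvFind fuel p x = (p', rootp p x) ∧ p'.length = p.length ∧ Forest p' ∧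
        ∀ z, rootp p' z = rootp p z := by
  intro fuel
  induction fuel with
  | zero => intro x hx h; omega
  | succ fuel ih =>
    intro x hx h
    by_cases hr : pget p x = x
    · have hr' : p[x]?.getD x = x := by
        simpa [pget, List.getD_eq_getElem?_getD] using hr
      refine ⟨p, ?_, rfl, ⟨d, hM⟩, fun z => rfl⟩
      simp [pvFind, hr', rootp_of_root hr]
    · have hr' : ¬ (p[x]?.getD x = x) := by
        simpa [pget, List.getD_eq_getElem?_getD] using hr
      have hpx : pget p x < p.length := (hM x hx).1
      have hDc := Dc_lt hM hx hr
      obtain ⟨p', heq, hlen, hF', hroots⟩ := ih (pget p x) hpx (by omega)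
      have hstep : rootp p (pget p x) = rootp p x := (rootp_step hM hx hr).symm
      have hne' : pget p' x ≠ x := by
        intro hcon
        have h1 : rootp p' x = x := rootp_of_root hcon
        rw [hroots x] at h1
        exact rootp_ne_self hM hx hr h1
      have hxl' : x < p'.length := by rw [hlen]; exact hx
      obtain ⟨hF2, hroots2⟩ := forest_set_root hF' hxl' hne'
      have hval : rootp p' x = rootp p x := hroots x
      rw [hval] at hF2 hroots2
      refine ⟨p'.set x (rootp p x), ?_, by simp [hlen], hF2,
        fun z => (hroots2 z).trans (hroots z)⟩
      have hget : (p'.set x (rootp p x))[x]?.getD x = rootp p x := by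
        have := pget_set (p := p') (x := x) (v := rootp p x) (z := x)
        simpa [pget, hxl', List.getD_eq_getElem?_getD] using this
      have heqD : pvFind fuel p (p[x]?.getD x) = (p', rootp p x) := by
        have hgd : p[x]?.getD x = pget p x := by
          simp [pget, List.getD_eq_getElem?_getD]
        rw [hgd, heq, hstep]
      simp [pvFind, hr', heqD, hget]

lemma find_top {p : List Nat} (hF : Forest p) {x : Nat} (hx : x < p.length) :
    ∃ p', pvFind p.length p x = (p', rootp p x) ∧ p'.length = p.length ∧ Forest p' ∧
      ∀ z, rootp p' z = rootp p z := by
  obtain ⟨d, hM⟩ := hF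
  exact find_ok hM p.length x hx (Dc_bound d hx)

def mrel (R : Nat → Nat → Prop) (i j u v : Nat) : Prop :=
  R u v ∨ (R u i ∧ R j v) ∨ (R u j ∧ R i v)

lemma union_ok {p rk : List Nat} (hF : Forest p) {x y : Nat}
    (hx : x < p.length) (hy : y < p.length) :
    (pvUnion p rk x y).1.length = p.length ∧ Forest (pvUnion p rk x y).1 ∧
      ∀ u v, (rootp (pvUnion p rk x y).1 u = rootp (pvUnion p rk x y).1 v ↔
        mrel (fun a b => rootp p a = rootp p b) x y u v) := by
  obtain ⟨p1, he1, hl1, hF1, hr1⟩ := find_top hF hx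
  have hy1 : y < p1.length := by rw [hl1]; exact hy
  obtain ⟨p2, he2, hl2, hF2, hr2⟩ := find_top hF1 hy1
  have he2' : pvFind p1.length p1 y = (p2, rootp p y) := by rw [he2, hr1]
  have hr21 : ∀ z, rootp p2 z = rootp p z := fun z => (hr2 z).trans (hr1 z)
  by_cases hxy : rootp p x = rootp p y
  · have hfst : (pvUnion p rk x y).1 = p2 := by
      simp [pvUnion, he1, he2', hxy]
    rw [hfst]
    refine ⟨hl2.trans hl1, hF2, fun u v => ?_⟩
    rw [hr21 u, hr21 v]
    unfold mrel
    constructor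
    · exact fun h => Or.inl h
    · rintro (h | ⟨h1, h2⟩ | ⟨h1, h2⟩) <;> omega
  · have hrootx : pget p2 (rootp p x) = rootp p x := by
      have := rootp_root hF2 x
      rwa [hr21 x] at this
    have hrooty : pget p2 (rootp p y) = rootp p y := by
      have := rootp_root hF2 y
      rwa [hr21 y] at this
    have hxlt : rootp p x < p2.length := by
      rw [hl2, hl1]; exact rootp_lt hF hx
    have hylt : rootp p y < p2.length := by
      rw [hl2, hl1]; exact rootp_lt hF hy
    by_cases hrk : rk.getD (rootp p x) 0 < rk.getD (rootp p y) 0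
    · have hrk' : rk[rootp p x]?.getD 0 < rk[rootp p y]?.getD 0 := by
        simpa [List.getD_eq_getElem?_getD] using hrk
      have hfst : (pvUnion p rk x y).1 = p2.set (rootp p x) (rootp p y) := by
        simp [pvUnion, he1, he2', hxy, hrk']
      obtain ⟨hF3, hform⟩ := forest_set_link hF2 hrooty hrootx (Ne.symm hxy) hylt hxlt
      rw [hfst]
      refine ⟨by simp [hl2, hl1], hF3, fun u v => ?_⟩
      rw [hform u, hform v, hr21 u, hr21 v]
      unfold mrel
      split_ifs <;> omega
    · have hrk' : ¬ rk[rootp p x]?.getD 0 < rk[rootp p y]?.getD 0 := by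
        simpa [List.getD_eq_getElem?_getD] using hrk
      have hfst : (pvUnion p rk x y).1 = p2.set (rootp p y) (rootp p x) := by
        simp [pvUnion, he1, he2', hxy, hrk']
      obtain ⟨hF3, hform⟩ := forest_set_link hF2 hrootx hrooty hxy hxlt hylt
      rw [hfst]
      refine ⟨by simp [hl2, hl1], hF3, fun u v => ?_⟩
      rw [hform u, hform v, hr21 u, hr21 v]
      unfold mrel
      split_ifs <;> omega

-- ---- abstract state invariants and the merge fold ----
def DsuInv (n : Nat) (st : List Nat × List Nat) (R : Nat → Nat → Prop) : Prop :=
  st.1.length = n ∧ Forest st.1 ∧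
    ∀ u v, u < n → v < n → (rootp st.1 u = rootp st.1 v ↔ R u v)

def lbl (labels : List Nat) (u : Nat) : Nat := labels.getD u 0

def LblInv (n : Nat) (labels : List Nat) (R : Nat → Nat → Prop) : Prop :=
  labels.length = n ∧ ∀ u v, u < n → v < n → (lbl labels u = lbl labels v ↔ R u v)

lemma DsuInv_iff {n : Nat} {st : List Nat × List Nat} {R R' : Nat → Nat → Prop}
    (h : ∀ u v, u < n → v < n → (R u v ↔ R' u v)) (hI : DsuInv n st R) : DsuInv n st R' :=
  ⟨hI.1, hI.2.1, fun u v hu hv => (hI.2.2 u v hu hv).trans (h u v hu hv)⟩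

lemma LblInv_iff {n : Nat} {labels : List Nat} {R R' : Nat → Nat → Prop}
    (h : ∀ u v, u < n → v < n → (R u v ↔ R' u v)) (hI : LblInv n labels R) : LblInv n labels R' :=
  ⟨hI.1, fun u v hu hv => (hI.2 u v hu hv).trans (h u v hu hv)⟩

lemma eqvGen_iff {E F : Nat → Nat → Prop} (h : ∀ a b, E a b ↔ F a b) (u v : Nat) :
    Relation.EqvGen E u v ↔ Relation.EqvGen F u v :=
  ⟨Relation.EqvGen.mono (fun a b => (h a b).1), Relation.EqvGen.mono (fun a b => (h a b).2)⟩

lemma eqvGen_false (u v : Nat) : Relation.EqvGen (fun _ _ => False) u v ↔ u = v := by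
  constructor
  · intro h
    induction h with
    | rel a b hab => exact hab.elim
    | refl a => rfl
    | symm a b _ ih => exact ih.symm
    | trans a b c _ _ ih1 ih2 => exact ih1.trans ih2
  · intro h
    subst h
    exact Relation.EqvGen.refl u

lemma eqvGen_pair (E : Nat → Nat → Prop) (i j u v : Nat) :
    Relation.EqvGen (fun a b => E a b ∨ (a = i ∧ b = j)) u v ↔
      mrel (Relation.EqvGen E) i j u v := by
  unfold mrel
  constructor
  · intro h
    induction h with
    | rel a b hab =>
      rcases hab with hab | ⟨ha, hb⟩
      · exact Or.inl (Relation.EqvGen.rel a b hab)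
      · subst ha; subst hb
        exact Or.inr (Or.inl ⟨Relation.EqvGen.refl _, Relation.EqvGen.refl _⟩)
    | refl a => exact Or.inl (Relation.EqvGen.refl a)
    | symm a b _ ih =>
      rcases ih with h1 | ⟨h1, h2⟩ | ⟨h1, h2⟩
      · exact Or.inl (h1.symm _ _)
      · exact Or.inr (Or.inr ⟨h2.symm _ _, h1.symm _ _⟩)
      · exact Or.inr (Or.inl ⟨h2.symm _ _, h1.symm _ _⟩)
    | trans a b c _ _ ih1 ih2 =>
      rcases ih1 with h1 | ⟨h1a, h1b⟩ | ⟨h1a, h1b⟩ <;>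
        rcases ih2 with h2 | ⟨h2a, h2b⟩ | ⟨h2a, h2b⟩
      · exact Or.inl (h1.trans _ _ _ h2)
      · exact Or.inr (Or.inl ⟨h1.trans _ _ _ h2a, h2b⟩)
      · exact Or.inr (Or.inr ⟨h1.trans _ _ _ h2a, h2b⟩)
      · exact Or.inr (Or.inl ⟨h1a, h1b.trans _ _ _ h2⟩)
      · exact Or.inl ((h1a.trans _ _ _ ((h2a.symm _ _).trans _ _ _ ((h1b.symm _ _).trans _ _ _ h2b))).trans _ _ _ (Relation.EqvGen.refl c))
      · exact Or.inl (h1a.trans _ _ _ h2b)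
      · exact Or.inr (Or.inr ⟨h1a, h1b.trans _ _ _ h2⟩)
      · exact Or.inl (h1a.trans _ _ _ h2b)
      · exact Or.inl (h1a.trans _ _ _ ((h2a.symm _ _).trans _ _ _ ((h1b.symm _ _).trans _ _ _ h2b)))
  · have hmono : ∀ {a b}, Relation.EqvGen E a b →
        Relation.EqvGen (fun a b => E a b ∨ (a = i ∧ b = j)) a b :=
      fun h => Relation.EqvGen.mono (fun a b hab => Or.inl hab) h
    have hij : Relation.EqvGen (fun a b => E a b ∨ (a = i ∧ b = j)) i j :=
      Relation.EqvGen.rel i j (Or.inr ⟨rfl, rfl⟩)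
    rintro (h | ⟨h1, h2⟩ | ⟨h1, h2⟩)
    · exact hmono h
    · exact ((hmono h1).trans _ _ _ hij).trans _ _ _ (hmono h2)
    · exact ((hmono h1).trans _ _ _ (hij.symm _ _)).trans _ _ _ (hmono h2)

def erel (adj : Nat → Nat → Bool) (es : List (Nat × Nat)) (a b : Nat) : Prop :=
  (a, b) ∈ es ∧ adj a b = true

lemma dsu_step {n : Nat} {st : List Nat × List Nat} {R : Nat → Nat → Prop}
    (hI : DsuInv n st R) {i j : Nat} (hi : i < n) (hj : j < n) :
    DsuInv n (pvUnion st.1 st.2 i j) (mrel R i j) := by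
  obtain ⟨hlen, hF, hiff⟩ := hI
  obtain ⟨hl2, hF2, hpart⟩ := union_ok (rk := st.2) hF
    (by rw [hlen]; exact hi) (by rw [hlen]; exact hj)
  refine ⟨hl2.trans hlen, hF2, fun u v hu hv => (hpart u v).trans ?_⟩
  simp only [mrel]
  rw [hiff u v hu hv, hiff u i hu hi, hiff j v hj hv, hiff u j hu hj, hiff i v hi hv]

lemma dsu_fold {n : Nat} (adj : Nat → Nat → Bool) :
    ∀ (es : List (Nat × Nat)) (st : List Nat × List Nat) (E0 : Nat → Nat → Prop),
      (∀ e ∈ es, e.1 < n ∧ e.2 < n) →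
      DsuInv n st (Relation.EqvGen E0) →
      DsuInv n
        (es.foldl (fun st e => if adj e.1 e.2 then pvUnion st.1 st.2 e.1 e.2 else st) st)
        (Relation.EqvGen (fun a b => E0 a b ∨ erel adj es a b)) := by
  intro es
  induction es with
  | nil =>
    intro st E0 hm hI
    simp only [List.foldl_nil]
    exact DsuInv_iff (fun u v hu hv =>
      eqvGen_iff (fun a b => by simp [erel]) u v) hI
  | cons e es ih =>
    obtain ⟨i, j⟩ := e
    intro st E0 hm hI
    have hi := (hm (i, j) (by simp)).1
    have hj := (hm (i, j) (by simp)).2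
    simp only [List.foldl_cons]
    by_cases hadj : adj i j = true
    · have hstep : DsuInv n (pvUnion st.1 st.2 i j)
          (Relation.EqvGen (fun a b => E0 a b ∨ (a = i ∧ b = j))) :=
        DsuInv_iff (fun u v hu hv => (eqvGen_pair E0 i j u v).symm) (dsu_step hI hi hj)
      have hrec := ih (pvUnion st.1 st.2 i j) _ (fun e he => hm e (by simp [he])) hstep
      have hstep_eq : (if adj i j = true then pvUnion st.1 st.2 i j else st) =
          pvUnion st.1 st.2 i j := by simp [hadj]
      rw [hstep_eq]
      refine DsuInv_iff (fun u v hu hv => eqvGen_iff (fun a b => ?_) u v) hrec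
      simp only [erel, List.mem_cons]
      constructor
      · rintro ((h0 | ⟨rfl, rfl⟩) | ⟨hmem, hadj'⟩)
        · exact Or.inl h0
        · exact Or.inr ⟨Or.inl rfl, hadj⟩
        · exact Or.inr ⟨Or.inr hmem, hadj'⟩
      · rintro (h0 | ⟨(heq | hmem), hadj'⟩)
        · exact Or.inl (Or.inl h0)
        · cases heq
          exact Or.inl (Or.inr ⟨rfl, rfl⟩)
        · exact Or.inr ⟨hmem, hadj'⟩
    · have hrec := ih st E0 (fun e he => hm e (by simp [he])) hI
      have hstep_eq : (if adj i j = true then pvUnion st.1 st.2 i j else st) = st := by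
        simp [hadj]
      rw [hstep_eq]
      refine DsuInv_iff (fun u v hu hv => eqvGen_iff (fun a b => ?_) u v) hrec
      simp only [erel, List.mem_cons]
      constructor
      · rintro (h0 | ⟨hmem, hadj'⟩)
        · exact Or.inl h0
        · exact Or.inr ⟨Or.inr hmem, hadj'⟩
      · rintro (h0 | ⟨(heq | hmem), hadj'⟩)
        · exact Or.inl h0
        · cases heq
          exact absurd hadj' hadj
        · exact Or.inr ⟨hmem, hadj'⟩

lemma getD_map_lt {labels : List Nat} {f : Nat → Nat} {u : Nat} (hu : u < labels.length) :
    (labels.map f).getD u 0 = f (labels.getD u 0) := by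
  simp [List.getD_eq_getElem?_getD, List.getElem?_eq_getElem hu]

lemma lbl_step {n : Nat} {labels : List Nat} {R : Nat → Nat → Prop}
    (hI : LblInv n labels R) {i j : Nat} (hi : i < n) (hj : j < n) :
    LblInv n
      (if labels.getD i 0 ≠ labels.getD j 0 then
        labels.map (fun l => if l = labels.getD j 0 then labels.getD i 0 else l)
      else labels)
      (mrel R i j) := by
  obtain ⟨hlen, hiff⟩ := hI
  have hu' : ∀ {u : Nat}, u < n → u < labels.length := fun hu => by omega
  by_cases hne : labels.getD i 0 ≠ labels.getD j 0
  · rw [if_pos hne]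
    refine ⟨by simp [hlen], fun u v hu hv => ?_⟩
    simp only [mrel]
    rw [← hiff u v hu hv, ← hiff u i hu hi, ← hiff j v hj hv, ← hiff u j hu hj,
      ← hiff i v hi hv]
    simp only [lbl]
    rw [getD_map_lt (hu' hu), getD_map_lt (hu' hv)]
    split_ifs <;> omega
  · rw [if_neg hne]
    refine ⟨hlen, fun u v hu hv => ?_⟩
    simp only [mrel]
    rw [← hiff u v hu hv, ← hiff u i hu hi, ← hiff j v hj hv, ← hiff u j hu hj,
      ← hiff i v hi hv]
    simp only [lbl]
    constructor
    · intro h; omega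
    · intro h; omega

lemma lbl_fold {n : Nat} (adj : Nat → Nat → Bool) :
    ∀ (es : List (Nat × Nat)) (labels : List Nat) (E0 : Nat → Nat → Prop),
      (∀ e ∈ es, e.1 < n ∧ e.2 < n) →
      LblInv n labels (Relation.EqvGen E0) →
      LblInv n
        (es.foldl (fun labels e =>
          if adj e.1 e.2 then
            (if labels.getD e.1 0 ≠ labels.getD e.2 0 then
              labels.map (fun l => if l = labels.getD e.2 0 then labels.getD e.1 0 else l)
            else labels)
          else labels) labels)
        (Relation.EqvGen (fun a b => E0 a b ∨ erel adj es a b)) := by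
  intro es
  induction es with
  | nil =>
    intro labels E0 hm hI
    simp only [List.foldl_nil]
    exact LblInv_iff (fun u v hu hv =>
      eqvGen_iff (fun a b => by simp [erel]) u v) hI
  | cons e es ih =>
    obtain ⟨i, j⟩ := e
    intro labels E0 hm hI
    have hi := (hm (i, j) (by simp)).1
    have hj := (hm (i, j) (by simp)).2
    simp only [List.foldl_cons]
    by_cases hadj : adj i j = true
    · have hstep : LblInv n
          (if labels.getD i 0 ≠ labels.getD j 0 then
            labels.map (fun l => if l = labels.getD j 0 then labels.getD i 0 else l)
          else labels)
          (Relation.EqvGen (fun a b => E0 a b ∨ (a = i ∧ b = j))) :=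
        LblInv_iff (fun u v hu hv => (eqvGen_pair E0 i j u v).symm) (lbl_step hI hi hj)
      have hrec := ih _ _ (fun e he => hm e (by simp [he])) hstep
      have hstep_eq : (if adj i j = true then
            (if labels.getD i 0 ≠ labels.getD j 0 then
              labels.map (fun l => if l = labels.getD j 0 then labels.getD i 0 else l)
            else labels)
          else labels) =
          (if labels.getD i 0 ≠ labels.getD j 0 then
            labels.map (fun l => if l = labels.getD j 0 then labels.getD i 0 else l)
          else labels) := by simp [hadj]
      rw [hstep_eq]
      refine LblInv_iff (fun u v hu hv => eqvGen_iff (fun a b => ?_) u v) hrec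
      simp only [erel, List.mem_cons]
      constructor
      · rintro ((h0 | ⟨rfl, rfl⟩) | ⟨hmem, hadj'⟩)
        · exact Or.inl h0
        · exact Or.inr ⟨Or.inl rfl, hadj⟩
        · exact Or.inr ⟨Or.inr hmem, hadj'⟩
      · rintro (h0 | ⟨(heq | hmem), hadj'⟩)
        · exact Or.inl (Or.inl h0)
        · cases heq
          exact Or.inl (Or.inr ⟨rfl, rfl⟩)
        · exact Or.inr ⟨hmem, hadj'⟩
    · have hrec := ih labels E0 (fun e he => hm e (by simp [he])) hI
      have hstep_eq : (if adj i j = true then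
            (if labels.getD i 0 ≠ labels.getD j 0 then
              labels.map (fun l => if l = labels.getD j 0 then labels.getD i 0 else l)
            else labels)
          else labels) = labels := by simp [hadj]
      rw [hstep_eq]
      refine LblInv_iff (fun u v hu hv => eqvGen_iff (fun a b => ?_) u v) hrec
      simp only [erel, List.mem_cons]
      constructor
      · rintro (h0 | ⟨hmem, hadj'⟩)
        · exact Or.inl h0
        · exact Or.inr ⟨Or.inr hmem, hadj'⟩
      · rintro (h0 | ⟨(heq | hmem), hadj'⟩)
        · exact Or.inl h0
        · cases heq
          exact absurd hadj' hadj
        · exact Or.inr ⟨hmem, hadj'⟩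

-- ---- pair lists ----
lemma foldl_flatMap {α β γ : Type} (f : α → List β) (g : γ → β → γ) :
    ∀ (l : List α) (init : γ),
      (l.flatMap f).foldl g init = l.foldl (fun s x => (f x).foldl g s) init := by
  intro l
  induction l with
  | nil => intro init; rfl
  | cons x xs ih => intro init; simp [List.flatMap_cons, List.foldl_append, ih]

def esA (n : Nat) : List (Nat × Nat) :=
  (List.range n).flatMap (fun i => (List.range' (i+1) (n - (i+1))).map (fun j => (i, j)))

def esB (n : Nat) : List (Nat × Nat) :=
  (List.range n).flatMap (fun j => (List.range j).map (fun i => (i, j)))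

lemma mem_esA {n a b : Nat} : (a, b) ∈ esA n ↔ a < b ∧ b < n := by
  unfold esA
  simp only [List.mem_flatMap, List.mem_map, List.mem_range, List.mem_range'_1,
    Prod.mk.injEq]
  constructor
  · rintro ⟨i, hi, j, ⟨hj1, hj2⟩, rfl, rfl⟩
    omega
  · rintro ⟨hab, hbn⟩
    exact ⟨a, by omega, b, ⟨by omega, by omega⟩, rfl, rfl⟩

lemma mem_esB {n a b : Nat} : (a, b) ∈ esB n ↔ a < b ∧ b < n := by
  unfold esB
  simp only [List.mem_flatMap, List.mem_map, List.mem_range, Prod.mk.injEq]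
  constructor
  · rintro ⟨j, hj, i, hi, rfl, rfl⟩
    omega
  · rintro ⟨hab, hbn⟩
    exact ⟨b, hbn, a, hab, rfl, rfl⟩

-- ---- hamming bridge ----
lemma ham_sum : ∀ (l : List (Char × Char)) (a : Nat),
    l.foldl (fun acc c => acc + (if c.1 ≠ c.2 then 1 else 0)) a =
      a + l.countP (fun c => decide (c.1 ≠ c.2)) := by
  intro l
  induction l with
  | nil => intro a; simp
  | cons c rest ih =>
    intro a
    rw [List.foldl_cons, List.countP_cons, ih]
    by_cases hc : c.1 = c.2
    · rw [if_neg (by simp [hc]), if_neg (by simp [hc])]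
      omega
    · rw [if_pos hc, if_pos (by simp [hc])]
      omega

lemma ham1_aux : ∀ (l : List (Char × Char)) (d : Nat),
    pvHam1Aux l d = decide (d + l.countP (fun c => decide (c.1 ≠ c.2)) = 1) := by
  intro l
  induction l with
  | nil => intro d; simp [pvHam1Aux]
  | cons c rest ih =>
    intro d
    rw [List.countP_cons]
    by_cases hc : c.1 = c.2
    · rw [if_neg (by simp [hc])]
      have hstep : pvHam1Aux (c :: rest) d = pvHam1Aux rest d := by
        simp [pvHam1Aux, hc]
      rw [hstep, ih]
      exact decide_eq_decide.mpr (by omega)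
    · rw [if_pos (by simp [hc])]
      by_cases hd : d + 1 > 1
      · have hstep : pvHam1Aux (c :: rest) d = false := by
          simp [pvHam1Aux, hc, hd]
        rw [hstep]
        exact (decide_eq_false (by omega)).symm
      · have hstep : pvHam1Aux (c :: rest) d = pvHam1Aux rest (d + 1) := by
          simp [pvHam1Aux, hc, hd]
        rw [hstep, ih]
        exact decide_eq_decide.mpr (by omega)

lemma ham_bridge (s t : String) : pvHamming1 s t = decide (pvHamming s t = 1) := by
  unfold pvHamming1 pvHamming
  rw [ham1_aux, ham_sum]

-- ---- final check loops ----
lemma check_ok (root : Nat) (g : Nat → Nat) :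
    ∀ (is : List Nat) (p : List Nat), Forest p → (∀ i ∈ is, i < p.length) →
      (∀ z, rootp p z = g z) →
      (pvCheck root p is = true ↔ ∀ i ∈ is, g i = root) := by
  intro is
  induction is with
  | nil => intro p hF hmem hroots; simp [pvCheck]
  | cons i rest ih =>
    intro p hF hmem hroots
    have hi := hmem i (by simp)
    obtain ⟨p', he, hlen, hF', hr'⟩ := find_top hF hi
    simp only [pvCheck]
    rw [he]
    by_cases hcond : g i = root
    · have : rootp p i = root := by rw [hroots i]; exact hcond
      rw [if_pos this,
        ih p' hF' (fun z hz => by rw [hlen]; exact hmem z (by simp [hz]))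
          (fun z => (hr' z).trans (hroots z))]
      simp [hcond]
    · have : ¬ rootp p i = root := by rw [hroots i]; exact hcond
      rw [if_neg this]
      simp only [Bool.false_eq_true, false_iff]
      intro hall
      exact hcond (hall i (by simp))

lemma all_lbl (labels : List Nat) (h : 0 < labels.length) :
    (labels.all (fun l => l = labels.getD 0 0) = true) ↔
      ∀ u, u < labels.length → lbl labels u = lbl labels 0 := by
  have hgd : ∀ (u : Nat) (hu : u < labels.length), lbl labels u = labels[u]'hu := by
    intro u hu
    simp [lbl, List.getD_eq_getElem?_getD, List.getElem?_eq_getElem hu]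
  rw [List.all_eq_true]
  constructor
  · intro hall u hu
    have := hall (labels[u]'hu) (List.getElem_mem hu)
    rw [decide_eq_true_eq] at this
    rw [hgd u hu, this]
    rfl
  · intro h x hx
    obtain ⟨u, hu, rfl⟩ := List.mem_iff_getElem.mp hx
    rw [decide_eq_true_eq, ← hgd u hu, h u hu]
    rfl

set_option maxHeartbeats 1000000 in
lemma main_equiv (strings : List String) (hne : strings ≠ []) :
    can_visit_all_indices strings = can_visit_all_indices_alt strings := by
  have hn1 : 0 < strings.length := List.length_pos_of_ne_nil hne
  set n := strings.length with hn
  set adjA : Nat → Nat → Bool :=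
    fun i j => decide (pvHamming (strings.getD i "") (strings.getD j "") = 1) with hadjA
  -- initial invariants
  have hpget0 : ∀ z, pget (List.range n) z = z := by
    intro z
    by_cases hz : z < n
    · simp [pget, List.getD_eq_getElem?_getD, List.getElem?_range, hz]
    · exact pget_of_ge (by simpa using le_of_not_gt hz)
  have hF0 : Forest (List.range n) :=
    ⟨fun _ => 0, fun x hx => ⟨by rw [hpget0]; simpa using hx,
      fun h => absurd (hpget0 x) h⟩⟩
  have hg0 : ∀ w, w < n → lbl (List.range n) w = w := by
    intro w hw
    simp [lbl, List.getD_eq_getElem?_getD, List.getElem?_range, hw]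
  have hInv0A : DsuInv n (List.range n, List.replicate n 0)
      (Relation.EqvGen (fun _ _ => False)) := by
    refine ⟨by simp, hF0, fun u v hu hv => ?_⟩
    rw [rootp_of_root (hpget0 u), rootp_of_root (hpget0 v), eqvGen_false]
  have hInv0B : LblInv n (List.range n) (Relation.EqvGen (fun _ _ => False)) := by
    refine ⟨by simp, fun u v hu hv => ?_⟩
    rw [eqvGen_false, hg0 u hu, hg0 v hv]
  have hmemA : ∀ e ∈ esA n, e.1 < n ∧ e.2 < n := by
    rintro ⟨a, b⟩ he
    have := mem_esA.mp he
    exact ⟨by omega, by omega⟩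
  have hmemB : ∀ e ∈ esB n, e.1 < n ∧ e.2 < n := by
    rintro ⟨a, b⟩ he
    have := mem_esB.mp he
    exact ⟨by omega, by omega⟩
  have hInvA := dsu_fold adjA (esA n) (List.range n, List.replicate n 0) _ hmemA hInv0A
  have hInvB := lbl_fold adjA (esB n) (List.range n) _ hmemB hInv0B
  -- rewrite the two ports' nested folds into the pair-list folds
  have hfoldA :
      (List.range n).foldl (fun st i =>
        (List.range' (i+1) (n - (i+1))).foldl (fun st j =>
          if pvHamming (strings.getD i "") (strings.getD j "") = 1 then
            pvUnion st.1 st.2 i j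
          else st) st) (List.range n, List.replicate n 0) =
      (esA n).foldl (fun st e => if adjA e.1 e.2 then pvUnion st.1 st.2 e.1 e.2 else st)
        (List.range n, List.replicate n 0) := by
    rw [esA, foldl_flatMap]
    congr 1
    funext st i
    rw [List.foldl_map]
    congr 1
    funext st j
    by_cases hP : pvHamming (strings.getD i "") (strings.getD j "") = 1 <;>
      simp [hadjA, hP]
  have hfoldB :
      (List.range n).foldl (fun labels j =>
        (List.range j).foldl (fun labels i =>
          if pvHamming1 (strings.getD i "") (strings.getD j "") then
            (if labels.getD i 0 ≠ labels.getD j 0 then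
              labels.map (fun l => if l = labels.getD j 0 then labels.getD i 0 else l)
            else labels)
          else labels) labels) (List.range n) =
      (esB n).foldl (fun labels e =>
        if adjA e.1 e.2 then
          (if labels.getD e.1 0 ≠ labels.getD e.2 0 then
            labels.map (fun l => if l = labels.getD e.2 0 then labels.getD e.1 0 else l)
          else labels)
        else labels) (List.range n) := by
    rw [esB, foldl_flatMap]
    congr 1
    funext labels j
    rw [List.foldl_map]
    congr 1
    funext labels i
    rw [ham_bridge]
  rw [← hfoldA] at hInvA
  rw [← hfoldB] at hInvB
  -- characterize port A's result
  obtain ⟨hlenA, hFA, hiffA⟩ := hInvA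
  obtain ⟨hlenB, hiffB⟩ := hInvB
  simp only [can_visit_all_indices, can_visit_all_indices_alt]
  rw [← hn]
  set stA := (List.range n).foldl (fun st i =>
      (List.range' (i+1) (n - (i+1))).foldl (fun st j =>
        if pvHamming (strings.getD i "") (strings.getD j "") = 1 then
          pvUnion st.1 st.2 i j
        else st) st) (List.range n, List.replicate n 0) with hstA
  set LB := (List.range n).foldl (fun labels j =>
      (List.range j).foldl (fun labels i =>
        if pvHamming1 (strings.getD i "") (strings.getD j "") then
          (if labels.getD i 0 ≠ labels.getD j 0 then
            labels.map (fun l => if l = labels.getD j 0 then labels.getD i 0 else l)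
          else labels)
        else labels) labels) (List.range n) with hLB
  obtain ⟨p1, he0, hlen1, hF1, hr1⟩ := find_top hFA (x := 0) (by rw [hlenA]; exact hn1)
  rw [he0]
  have hchkA := check_ok (rootp stA.1 0) (rootp stA.1) (List.range' 1 (n - 1)) p1 hF1
      (fun i hi => by
        rw [hlen1, hlenA]
        have := List.mem_range'_1.mp hi
        omega)
      (fun z => hr1 z)
  have hPA : (pvCheck (rootp stA.1 0) p1 (List.range' 1 (n - 1)) = true) ↔
      (∀ u, u < n → rootp stA.1 u = rootp stA.1 0) := by
    rw [hchkA]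
    constructor
    · intro h u hu
      by_cases hu0 : u = 0
      · rw [hu0]
      · exact h u (List.mem_range'_1.mpr ⟨by omega, by omega⟩)
    · intro h i hi
      have := List.mem_range'_1.mp hi
      exact h i (by omega)
  have hPB : (LB.all (fun l => l = LB.getD 0 0) = true) ↔
      (∀ u, u < n → lbl LB u = lbl LB 0) := by
    rw [all_lbl LB (by rw [hlenB]; exact hn1)]
    constructor
    · intro h u hu
      exact h u (by rw [hlenB]; exact hu)
    · intro h u hu
      exact h u (by rw [← hlenB]; exact hu)
  have hAB : ∀ a b, Relation.EqvGen (fun a b => (fun _ _ => False) a b ∨ erel adjA (esA n) a b) a b ↔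
      Relation.EqvGen (fun a b => (fun _ _ => False) a b ∨ erel adjA (esB n) a b) a b := by
    intro a b
    exact eqvGen_iff (fun a b => by simp [erel, mem_esA, mem_esB]) a b
  have hconn : (∀ u, u < n → rootp stA.1 u = rootp stA.1 0) ↔
      (∀ u, u < n → lbl LB u = lbl LB 0) := by
    constructor
    · intro h u hu
      exact (hiffB u 0 hu hn1).mpr ((hAB u 0).mp ((hiffA u 0 hu hn1).mp (h u hu)))
    · intro h u hu
      exact (hiffA u 0 hu hn1).mpr ((hAB u 0).mpr ((hiffB u 0 hu hn1).mp (h u hu)))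
  have hbool : pvCheck (rootp stA.1 0) p1 (List.range' 1 (n - 1)) =
      LB.all (fun l => l = LB.getD 0 0) := by
    have h1 := hPA.trans (hconn.trans hPB.symm)
    cases hA : pvCheck (rootp stA.1 0) p1 (List.range' 1 (n - 1)) with
    | false =>
      cases hB : LB.all (fun l => l = LB.getD 0 0) with
      | false => rfl
      | true =>
        have hx := h1.mpr hB
        rw [hA] at hx
        exact Bool.noConfusion hx
    | true =>
      cases hB : LB.all (fun l => l = LB.getD 0 0) with
      | false =>
        have hx := h1.mp hA
        rw [hB] at hx
        exact Bool.noConfusion hx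
      | true => rfl
  rw [hbool]

-- ===== VERDICT (by name: the statement is the Claim_ definition above) =====
theorem can_visit_all_indices_spec : Claim_equal_can_visit_all_indices := by
  unfold Claim_equal_can_visit_all_indices
  intro strings _ hpre
  unfold Spec_can_visit_all_indices
  exact main_equiv strings hpre
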